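-- pv_equiv track=rewrite | github.com/qed-cc/qed-crypto | tools/atomic_truth_analyzer.py | find_path_to_foundation
-- ===== SOURCE A (Python) =====
-- def find_path_to_foundation(step_id, steps_dict, path=None):
--     """Find shortest path to a foundation (no dependencies)"""
--     if path is None:
--         path = []
--
--     if step_id not in steps_dict:
--         return path
--
--     step = steps_dict[step_id]
--     path = path + [step_id]
--
--     if not step.get('deps'):
--         return path
--
--     # Find shortest path through dependencies
--     shortest = None
--     for dep in step['deps']:
--         dep_path = find_path_to_foundation(dep, steps_dict, path)
--         if shortest is None or len(dep_path) < len(shortest):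
--             shortest = dep_path
--
--     return shortest or path
-- ===== SOURCE B (Python) =====
-- def find_path_to_foundation(step_id, steps_dict, path=None):
--     """Find shortest path to a foundation (no dependencies).
--
--     Memoized DP over the DAG: the shortest tail starting at each step is
--     computed once and cached (DP over the DAG); the caller's accumulated path is just a prefix.
--     """
--     prefix = [] if path is None else path
--     memo = {}
--
--     def chain(s):
--         if s in memo:
--             return memo[s]
--         step = steps_dict.get(s)
--         if step is None:
--             res = []
--         else:
--             deps = step.get('deps')
--             if not deps:
--                 res = [s]
--             else:
--                 best = None
--                 for d in deps:
--                     c = chain(d)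
--                     if best is None or len(c) < len(best):
--                         best = c
--                 res = [s] + best
--         memo[s] = res
--         return res
--
--     return prefix + chain(step_id)
-- ===== Notes on version B (the rewrite author's own statement) =====
-- stated objective: alternative
-- what changed: B computes the shortest tail per step once in a memo table (DP over the DAG) and prepends the caller's accumulated path as a mere prefix, instead of A's re-exploration of every shared dependency path with the prefix threaded through the recursion.
import Mathlib
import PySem

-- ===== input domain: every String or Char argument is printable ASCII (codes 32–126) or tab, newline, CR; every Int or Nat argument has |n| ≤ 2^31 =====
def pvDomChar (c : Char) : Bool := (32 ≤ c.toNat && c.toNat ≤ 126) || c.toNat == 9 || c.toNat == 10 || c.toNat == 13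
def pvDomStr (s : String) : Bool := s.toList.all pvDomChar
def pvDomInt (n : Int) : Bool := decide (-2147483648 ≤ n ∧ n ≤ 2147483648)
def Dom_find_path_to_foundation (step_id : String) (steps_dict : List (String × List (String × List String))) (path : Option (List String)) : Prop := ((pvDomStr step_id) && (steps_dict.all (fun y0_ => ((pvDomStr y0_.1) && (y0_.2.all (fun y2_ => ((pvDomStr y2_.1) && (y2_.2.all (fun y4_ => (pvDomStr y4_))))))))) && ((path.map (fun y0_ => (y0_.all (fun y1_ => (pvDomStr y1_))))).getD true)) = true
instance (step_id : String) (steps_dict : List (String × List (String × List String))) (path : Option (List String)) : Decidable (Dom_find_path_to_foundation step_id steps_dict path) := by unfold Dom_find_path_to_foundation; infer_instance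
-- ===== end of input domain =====

-- B memoizes the shortest tail per step (DP over the DAG) and prepends the caller's path as a
-- prefix, instead of A's re-exploration of shared dependency paths (objective: alternative).
-- Pre_ excludes dependency graphs with a cycle reachable from step_id, on which both Pythons
-- recurse forever (RecursionError); the fuel in the ports only makes that recursion total.

-- ===== PORT A =====
-- A, transliterated: recursion threading the accumulated `path`; the fuel argument only
-- totalises the recursion (on an acyclic graph, Pre_, it is never exhausted).
def pvGoA (sd : List (String × List (String × List String))) :
    Nat → String → List String → List String
  | 0, _, path => path
  | fuel+1, step_id, path =>
    match List.lookup step_id sd with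
    | none => path
    | some step =>
      let path2 := path ++ [step_id]
      let deps := (List.lookup "deps" step).getD []
      if deps = [] then path2
      else
        let shortest := deps.foldl (fun shortest dep =>
          let dep_path := pvGoA sd fuel dep path2
          match shortest with
          | none => some dep_path
          | some s => if dep_path.length < s.length then some dep_path else some s) none
        match shortest with
        | none => path2
        | some l => if l = [] then path2 else l

def find_path_to_foundation (step_id : String) (steps_dict : List (String × List (String × List String))) (path : Option (List String)) : List String :=
  pvGoA steps_dict (steps_dict.length + 1) step_id (path.getD [])

-- ===== PORT B =====
-- B, transliterated: chain s = shortest tail from s, cached in `memo` (an assoc list threaded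
-- through the recursion, like Source B's dict); fuel as above.
def pvChainB (sd : List (String × List (String × List String))) :
    Nat → List (String × List String) → String → List String × List (String × List String)
  | fuel, memo, s =>
    match List.lookup s memo with
    | some v => (v, memo)
    | none =>
      match fuel with
      | 0 => ([], memo)
      | fuel+1 =>
        match List.lookup s sd with
        | none => ([], memo ++ [(s, [])])
        | some step =>
          let deps := (List.lookup "deps" step).getD []
          if deps = [] then ([s], memo ++ [(s, [s])])
          else
            let r := deps.foldl (fun (p : Option (List String) × List (String × List String)) d =>
              let cm := pvChainB sd fuel p.2 d
              (match p.1 with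
               | none => some cm.1
               | some b => if cm.1.length < b.length then some cm.1 else some b, cm.2)) (none, memo)
            let res := s :: r.1.getD []
            (res, r.2 ++ [(s, res)])
  termination_by fuel _ _ => fuel

def find_path_to_foundation_alt (step_id : String) (steps_dict : List (String × List (String × List String))) (path : Option (List String)) : List String :=
  path.getD [] ++ (pvChainB steps_dict (steps_dict.length + 1) [] step_id).1

-- ===== PRECONDITION & SPEC =====
-- Height of a step in the dependency graph (longest dependency chain below it), computed to
-- depth `fuel`: `some` exactly when every dependency chain from s ends within `fuel` edges.
def pvH (sd : List (String × List (String × List String))) : Nat → String → Option Nat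
  | 0, s =>
    match List.lookup s sd with
    | none => some 0
    | some step => if (List.lookup "deps" step).getD [] = [] then some 0 else none
  | fuel+1, s =>
    match List.lookup s sd with
    | none => some 0
    | some step =>
      let deps := (List.lookup "deps" step).getD []
      if deps = [] then some 0
      else (deps.foldl (fun acc d =>
              match acc, pvH sd fuel d with
              | some m, some vd => some (max m vd)
              | _, _ => none) (some 0)).map (· + 1)

-- Pre_: the part of the dependency graph reachable from step_id is acyclic, i.e. it has a
-- finite height (for an acyclic graph the height is at most the number of entries of
-- steps_dict); on a reachable cycle the Python A (and the Python B) recurse without bound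
-- and raise RecursionError, so those inputs are excluded.
def Pre_find_path_to_foundation (step_id : String) (steps_dict : List (String × List (String × List String))) (path : Option (List String)) : Prop :=
  (pvH steps_dict steps_dict.length step_id).isSome = true
instance (step_id : String) (steps_dict : List (String × List (String × List String))) (path : Option (List String)) : Decidable (Pre_find_path_to_foundation step_id steps_dict path) := by unfold Pre_find_path_to_foundation; infer_instance

def pvWitness_find_path_to_foundation : String × (List (String × List (String × List String))) × Option (List String) :=
  ("a", [("a", [("deps", ["b"])]), ("b", [("deps", [])])], some ["p"])

def Spec_find_path_to_foundation (step_id : String) (steps_dict : List (String × List (String × List String))) (path : Option (List String)) (out : List String) : Prop := out = find_path_to_foundation_alt step_id steps_dict path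
instance (step_id : String) (steps_dict : List (String × List (String × List String))) (path : Option (List String)) (out : List String) : Decidable (Spec_find_path_to_foundation step_id steps_dict path out) := by unfold Spec_find_path_to_foundation; infer_instance

-- ===== CLAIM (what is proved, stated in full; the proofs are below) =====
def Claim_equal_find_path_to_foundation : Prop := ∀ (step_id : String) (steps_dict : List (String × List (String × List String))) (path : Option (List String)), Dom_find_path_to_foundation step_id steps_dict path → Pre_find_path_to_foundation step_id steps_dict path → Spec_find_path_to_foundation step_id steps_dict path (find_path_to_foundation step_id steps_dict path)

-- ===== LEMMAS AND PROOFS =====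
-- pvChainP is the pure (unmemoized) shortest tail from a step: the bridge between the two
-- ports.  pvGoA_eq: A's result is the caller's path ++ that tail.  pvChainB_eq: B's memoized
-- chain computes the same tail, with the memo invariant pvGoodM.  pvChainP_inv: on an acyclic
-- reachable graph (pvH finite) the tail does not depend on the fuel, proved by strong
-- induction on the height.

def pvBest (b : Option (List String)) (c : List String) : Option (List String) :=
  match b with
  | none => some c
  | some b => if c.length < b.length then some c else some b

def pvChainP (sd : List (String × List (String × List String))) : Nat → String → List String
  | 0, _ => []
  | fuel+1, s =>
    match List.lookup s sd with
    | none => []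
    | some step =>
      let deps := (List.lookup "deps" step).getD []
      if deps = [] then [s]
      else s :: (deps.foldl (fun b d => pvBest b (pvChainP sd fuel d)) none).getD []

theorem pvFoldA (g : String → List String) (p : List String) :
    ∀ (ds : List String) (b : Option (List String)),
      ds.foldl (fun shortest dep =>
          let dep_path := p ++ g dep
          match shortest with
          | none => some dep_path
          | some s => if dep_path.length < s.length then some dep_path else some s)
        (b.map (p ++ ·))
      = (ds.foldl (fun b d => pvBest b (g d)) b).map (p ++ ·) := by
  intro ds
  induction ds with
  | nil => intro b; simp
  | cons d ds ih =>
    intro b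
    have hstep : (fun shortest dep =>
          let dep_path := p ++ g dep
          match shortest with
          | none => some dep_path
          | some s => if dep_path.length < s.length then some dep_path else some s)
        (b.map (p ++ ·)) d = (pvBest b (g d)).map (p ++ ·) := by
      cases b with
      | none => simp [pvBest]
      | some x =>
        simp only [Option.map_some, pvBest, List.length_append]
        by_cases h : (g d).length < x.length
        · simp [h, Nat.add_lt_add_iff_left]
        · simp [h, Nat.add_lt_add_iff_left]
    simp only [List.foldl_cons, hstep, ih]

theorem pvBest_fold_some (g : String → List String) :
    ∀ (ds : List String) (t : List String),
      ∃ u, ds.foldl (fun b d => pvBest b (g d)) (some t) = some u := by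
  intro ds
  induction ds with
  | nil => intro t; exact ⟨t, rfl⟩
  | cons d ds ih =>
    intro t
    simp only [List.foldl_cons, pvBest]
    split <;> apply ih

theorem pvGoA_eq (sd : List (String × List (String × List String))) :
    ∀ (f : Nat) (s : String) (path : List String),
      pvGoA sd f s path = path ++ pvChainP sd f s := by
  intro f
  induction f with
  | zero => intro s path; simp [pvGoA, pvChainP]
  | succ f ih =>
    intro s path
    rw [pvGoA, pvChainP]
    cases hlk : List.lookup s sd with
    | none => simp
    | some step =>
      simp only
      set deps := (List.lookup "deps" step).getD [] with hdeps
      by_cases hd : deps = []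
      · simp [hd]
      · simp only [hd, if_neg hd, reduceIte]
        have hfold :
            deps.foldl (fun shortest dep =>
              let dep_path := pvGoA sd f dep (path ++ [s])
              match shortest with
              | none => some dep_path
              | some s => if dep_path.length < s.length then some dep_path else some s) none
            = (deps.foldl (fun b d => pvBest b (pvChainP sd f d)) none).map ((path ++ [s]) ++ ·) := by
          have := pvFoldA (pvChainP sd f) (path ++ [s]) deps none
          simp only [Option.map_none] at this
          rw [← this]
          apply PySem.List.foldl_congr_mem
          intro b d _
          simp [ih]
        rw [hfold]
        obtain ⟨d0, ds0, hcons⟩ := List.exists_cons_of_ne_nil hd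
        rw [hcons]
        obtain ⟨u, hu⟩ := pvBest_fold_some (pvChainP sd f) ds0 (pvChainP sd f d0)
        simp only [List.foldl_cons]
        rw [show pvBest none (pvChainP sd f d0) = some (pvChainP sd f d0) from rfl, hu]
        have hne : path ++ [s] ++ u ≠ [] := by simp
        simp [hne]

theorem pvHfold_none (sd : List (String × List (String × List String))) (f : Nat) :
    ∀ (ds : List String),
      ds.foldl (fun acc d =>
        match acc, pvH sd f d with
        | some m, some vd => some (max m vd)
        | _, _ => none) none = none := by
  intro ds
  induction ds with
  | nil => rfl
  | cons d ds ih =>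
    simp only [List.foldl_cons]
    cases pvH sd f d <;> exact ih

theorem pvHfold_mem (sd : List (String × List (String × List String))) (f : Nat) :
    ∀ (ds : List String) (a m : Nat),
      ds.foldl (fun acc d =>
        match acc, pvH sd f d with
        | some m, some vd => some (max m vd)
        | _, _ => none) (some a) = some m →
      a ≤ m ∧ ∀ d ∈ ds, ∃ vd, pvH sd f d = some vd ∧ vd ≤ m := by
  intro ds
  induction ds with
  | nil => intro a m h; simp at h; exact ⟨by omega, by simp⟩
  | cons d ds ih =>
    intro a m h
    simp only [List.foldl_cons] at h
    cases hd : pvH sd f d with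
    | none => rw [hd] at h; rw [pvHfold_none] at h; exact absurd h (by simp)
    | some vd =>
      rw [hd] at h
      obtain ⟨hle, hmem⟩ := ih (max a vd) m h
      refine ⟨by omega, ?_⟩
      intro x hx
      rcases List.mem_cons.mp hx with rfl | hx
      · exact ⟨vd, hd, by omega⟩
      · exact hmem x hx

theorem pvH_zero (sd : List (String × List (String × List String))) (s : String) :
    pvH sd 0 s = (match List.lookup s sd with
      | none => some 0
      | some step => if (List.lookup "deps" step).getD [] = [] then some 0 else none) := rfl

theorem pvH_succ (sd : List (String × List (String × List String))) (f : Nat) (s : String) :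
    pvH sd (f+1) s = (match List.lookup s sd with
      | none => some 0
      | some step =>
        if (List.lookup "deps" step).getD [] = [] then some 0
        else (((List.lookup "deps" step).getD []).foldl (fun acc d =>
                match acc, pvH sd f d with
                | some m, some vd => some (max m vd)
                | _, _ => none) (some 0)).map (· + 1)) := rfl

theorem pvH_mono (sd : List (String × List (String × List String))) :
    ∀ (f : Nat) (s : String) (v : Nat), pvH sd f s = some v → pvH sd (f+1) s = some v := by
  intro f
  induction f with
  | zero =>
    intro s v h
    rw [pvH_zero] at h
    rw [pvH_succ]
    cases hlk : List.lookup s sd with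
    | none => rw [hlk] at h; simpa using h
    | some step =>
      rw [hlk] at h
      simp only at h ⊢
      by_cases hd : (List.lookup "deps" step).getD [] = []
      · simp only [if_pos hd] at h ⊢; exact h
      · rw [if_neg hd] at h; exact absurd h (by simp)
  | succ f ih =>
    intro s v h
    rw [pvH_succ] at h
    rw [pvH_succ]
    cases hlk : List.lookup s sd with
    | none => rw [hlk] at h; simpa using h
    | some step =>
      rw [hlk] at h
      simp only at h ⊢
      by_cases hd : (List.lookup "deps" step).getD [] = []
      · simp only [if_pos hd] at h ⊢; exact h
      · rw [if_neg hd] at h ⊢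
        set ds := (List.lookup "deps" step).getD []
        suffices hsuf : ∀ (l : List String) (a r : Nat),
            l.foldl (fun acc d =>
              match acc, pvH sd f d with
              | some m, some vd => some (max m vd)
              | _, _ => none) (some a) = some r →
            l.foldl (fun acc d =>
              match acc, pvH sd (f+1) d with
              | some m, some vd => some (max m vd)
              | _, _ => none) (some a) = some r by
          cases hfold : ds.foldl (fun acc d =>
              match acc, pvH sd f d with
              | some m, some vd => some (max m vd)
              | _, _ => none) (some 0) with
          | none => rw [hfold] at h; exact absurd h (by simp)
          | some m => rw [hfold] at h; rw [hsuf ds 0 m hfold]; exact h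
        intro l
        induction l with
        | nil => intro a r h; exact h
        | cons d l ihl =>
          intro a r h
          simp only [List.foldl_cons] at h ⊢
          cases hd' : pvH sd f d with
          | none => rw [hd'] at h; rw [pvHfold_none] at h; exact absurd h (by simp)
          | some vd => rw [hd'] at h; rw [ih d vd hd']; exact ihl _ _ h

theorem pvH_add (sd : List (String × List (String × List String))) :
    ∀ (k f : Nat) (s : String) (v : Nat), pvH sd f s = some v → pvH sd (f + k) s = some v := by
  intro k
  induction k with
  | zero => intro f s v h; exact h
  | succ k ihk =>
    intro f s v h
    have h2 := pvH_mono sd (f + k) s v (ihk f s v h)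
    show pvH sd ((f + k) + 1) s = some v
    exact h2

theorem pvH_mono_le (sd : List (String × List (String × List String))) :
    ∀ (f g : Nat), f ≤ g → ∀ (s : String) (v : Nat), pvH sd f s = some v → pvH sd g s = some v := by
  intro f g hle s v h
  have := pvH_add sd (g - f) f s v h
  rwa [Nat.add_sub_cancel' hle] at this

theorem pvHfold_bound (sd : List (String × List (String × List String))) (f : Nat)
    (hmem : ∀ (d : String) (v : Nat), pvH sd f d = some v → v ≤ f) :
    ∀ (l : List String) (a m : Nat),
      l.foldl (fun acc d =>
        match acc, pvH sd f d with
        | some m, some vd => some (max m vd)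
        | _, _ => none) (some a) = some m → a ≤ f → m ≤ f := by
  intro l
  induction l with
  | nil => intro a m h ha; simp at h; omega
  | cons d l ihl =>
    intro a m h ha
    simp only [List.foldl_cons] at h
    cases hd : pvH sd f d with
    | none => rw [hd] at h; rw [pvHfold_none] at h; exact absurd h (by simp)
    | some vd =>
      rw [hd] at h
      have hvd := hmem d vd hd
      exact ihl (max a vd) m h (by omega)

theorem pvH_le (sd : List (String × List (String × List String))) :
    ∀ (f : Nat) (s : String) (v : Nat), pvH sd f s = some v → v ≤ f := by
  intro f
  induction f with
  | zero =>
    intro s v h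
    rw [pvH_zero] at h
    cases hlk : List.lookup s sd with
    | none => rw [hlk] at h; simp at h; omega
    | some step =>
      rw [hlk] at h; simp only at h
      by_cases hd : (List.lookup "deps" step).getD [] = []
      · rw [if_pos hd] at h; simp at h; omega
      · rw [if_neg hd] at h; exact absurd h (by simp)
  | succ f ih =>
    intro s v h
    rw [pvH_succ] at h
    cases hlk : List.lookup s sd with
    | none => rw [hlk] at h; simp at h; omega
    | some step =>
      rw [hlk] at h; simp only at h
      by_cases hd : (List.lookup "deps" step).getD [] = []
      · rw [if_pos hd] at h; simp at h; omega
      · rw [if_neg hd] at h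
        cases hfold : ((List.lookup "deps" step).getD []).foldl (fun acc d =>
            match acc, pvH sd f d with
            | some m, some vd => some (max m vd)
            | _, _ => none) (some 0) with
        | none => rw [hfold] at h; exact absurd h (by simp)
        | some m =>
          rw [hfold] at h
          simp at h
          have := pvHfold_bound sd f ih _ 0 m hfold (by omega)
          omega

theorem pvH_dep (sd : List (String × List (String × List String))) (f : Nat) (s : String)
    (v : Nat) (step : List (String × List String))
    (h : pvH sd (f+1) s = some v) (hlk : List.lookup s sd = some step)
    (hd : (List.lookup "deps" step).getD [] ≠ []) :
    ∀ d ∈ (List.lookup "deps" step).getD [], ∃ vd, pvH sd f d = some vd ∧ vd + 1 ≤ v := by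
  rw [pvH_succ, hlk] at h
  simp only [if_neg hd] at h
  cases hfold : ((List.lookup "deps" step).getD []).foldl (fun acc d =>
      match acc, pvH sd f d with
      | some m, some vd => some (max m vd)
      | _, _ => none) (some 0) with
  | none => rw [hfold] at h; exact absurd h (by simp)
  | some m =>
    rw [hfold] at h
    simp at h
    intro d hdm
    obtain ⟨_, hall⟩ := pvHfold_mem sd f _ 0 m hfold
    obtain ⟨vd, hvd, hle⟩ := hall d hdm
    exact ⟨vd, hvd, by omega⟩

theorem pvChainP_succ (sd : List (String × List (String × List String))) (f : Nat) (s : String) :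
    pvChainP sd (f+1) s = (match List.lookup s sd with
      | none => []
      | some step =>
        if (List.lookup "deps" step).getD [] = [] then [s]
        else s :: (((List.lookup "deps" step).getD []).foldl
              (fun b d => pvBest b (pvChainP sd f d)) none).getD []) := rfl

theorem pvChainP_inv (sd : List (String × List (String × List String))) :
    ∀ (v : Nat) (s : String) (f1 f2 : Nat),
      pvH sd sd.length s = some v → v + 1 ≤ f1 → v + 1 ≤ f2 →
      pvChainP sd f1 s = pvChainP sd f2 s := by
  intro v
  induction v using Nat.strong_induction_on with
  | _ v ih =>
    intro s f1 f2 hv h1 h2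
    obtain ⟨a, rfl⟩ : ∃ a, f1 = a + 1 := ⟨f1 - 1, by omega⟩
    obtain ⟨b, rfl⟩ : ∃ b, f2 = b + 1 := ⟨f2 - 1, by omega⟩
    rw [pvChainP_succ, pvChainP_succ]
    cases hlk : List.lookup s sd with
    | none => rfl
    | some step =>
      simp only
      by_cases hd : (List.lookup "deps" step).getD [] = []
      · rw [if_pos hd, if_pos hd]
      · rw [if_neg hd, if_neg hd]
        cases hN : sd.length with
        | zero =>
          rw [hN, pvH_zero, hlk] at hv
          simp only [if_neg hd] at hv
          exact absurd hv (by simp)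
        | succ n =>
          rw [hN] at hv
          have hdep := pvH_dep sd n s v step hv hlk hd
          have hcongr : ((List.lookup "deps" step).getD []).foldl
                (fun bb d => pvBest bb (pvChainP sd a d)) none
              = ((List.lookup "deps" step).getD []).foldl
                (fun bb d => pvBest bb (pvChainP sd b d)) none := by
            apply PySem.List.foldl_congr_mem
            intro acc d hdm
            obtain ⟨vd, hvd, hlt⟩ := hdep d hdm
            have hvdN : pvH sd sd.length d = some vd :=
              pvH_mono_le sd n sd.length (by omega) d vd hvd
            rw [ih vd (by omega) d a b hvdN (by omega) (by omega)]
          rw [hcongr]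

def pvGoodM (sd : List (String × List (String × List String))) (memo : List (String × List String)) : Prop :=
  ∀ k v, List.lookup k memo = some v → v = pvChainP sd (sd.length + 2) k

theorem pvLookup_append (k : String) (l2 : List (String × List String)) :
    ∀ (l1 : List (String × List String)),
      List.lookup k (l1 ++ l2) = ((List.lookup k l1).orElse (fun _ => List.lookup k l2)) := by
  intro l1
  induction l1 with
  | nil => simp
  | cons p t ih =>
    obtain ⟨k1, v1⟩ := p
    simp only [List.cons_append, List.lookup]
    cases h : (k == k1) <;> simp [ih]

theorem pvChainP_nonkey (sd : List (String × List (String × List String))) (s : String)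
    (hlk : List.lookup s sd = none) : ∀ (f : Nat), pvChainP sd f s = [] := by
  intro f
  cases f with
  | zero => rfl
  | succ f => rw [pvChainP_succ, hlk]

theorem pvGoodM_append (sd : List (String × List (String × List String)))
    (memo : List (String × List String)) (s : String) (u : List String)
    (hg : pvGoodM sd memo) (hu : u = pvChainP sd (sd.length + 2) s) :
    pvGoodM sd (memo ++ [(s, u)]) := by
  intro k v h
  rw [pvLookup_append] at h
  cases hm : List.lookup k memo with
  | some w => rw [hm] at h; simp at h; subst h; exact hg k w hm
  | none =>
    rw [hm] at h
    simp only [Option.orElse, List.lookup] at h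
    cases hs : (k == s) with
    | false => rw [hs] at h; simp at h
    | true =>
      rw [hs] at h
      simp at h
      have hks : k = s := by simpa using hs
      subst hks
      rw [← h, hu]

theorem pvFoldB (sd : List (String × List (String × List String))) (f : Nat) :
    ∀ (ds : List String),
      (∀ d ∈ ds, ∀ memo, pvGoodM sd memo →
        (pvChainB sd f memo d).1 = pvChainP sd (sd.length + 2) d ∧
        pvGoodM sd (pvChainB sd f memo d).2) →
      ∀ (acc : Option (List String)) (memo : List (String × List String)), pvGoodM sd memo →
        (ds.foldl (fun (p : Option (List String) × List (String × List String)) d =>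
            let cm := pvChainB sd f p.2 d
            (match p.1 with
             | none => some cm.1
             | some b => if cm.1.length < b.length then some cm.1 else some b, cm.2)) (acc, memo)).1
          = ds.foldl (fun b d => pvBest b (pvChainP sd (sd.length + 2) d)) acc ∧
        pvGoodM sd
          ((ds.foldl (fun (p : Option (List String) × List (String × List String)) d =>
            let cm := pvChainB sd f p.2 d
            (match p.1 with
             | none => some cm.1
             | some b => if cm.1.length < b.length then some cm.1 else some b, cm.2)) (acc, memo)).2) := by
  intro ds
  induction ds with
  | nil => intro _ acc memo hg; exact ⟨rfl, hg⟩
  | cons d ds ih =>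
    intro hIH acc memo hg
    simp only [List.foldl_cons]
    obtain ⟨hc1, hc2⟩ := hIH d (by simp) memo hg
    have hstep : (let cm := pvChainB sd f memo d
        ((match acc with
          | none => some cm.1
          | some b => if cm.1.length < b.length then some cm.1 else some b), cm.2))
        = (pvBest acc (pvChainP sd (sd.length + 2) d), (pvChainB sd f memo d).2) := by
      simp only [hc1]
      cases acc <;> rfl
    rw [hstep]
    exact ih (fun d' hd' => hIH d' (by simp [hd'])) _ _ hc2

theorem pvChainB_eq (sd : List (String × List (String × List String))) :
    ∀ (v : Nat) (s : String) (f : Nat) (memo : List (String × List String)),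
      pvH sd sd.length s = some v → v + 1 ≤ f → pvGoodM sd memo →
      (pvChainB sd f memo s).1 = pvChainP sd (sd.length + 2) s ∧
      pvGoodM sd (pvChainB sd f memo s).2 := by
  intro v
  induction v using Nat.strong_induction_on with
  | _ v ih =>
    intro s f memo hv hf hg
    rw [pvChainB.eq_def]
    simp only
    cases hm : List.lookup s memo with
    | some u => simp only; exact ⟨hg s u hm, hg⟩
    | none =>
      obtain ⟨f', rfl⟩ : ∃ f', f = f' + 1 := ⟨f - 1, by omega⟩
      simp only
      cases hlk : List.lookup s sd with
      | none =>
        simp only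
        refine ⟨?_, pvGoodM_append sd memo s [] hg ?_⟩ <;>
          simp [pvChainP_nonkey sd s hlk]
      | some step =>
        simp only
        by_cases hd : (List.lookup "deps" step).getD [] = []
        · rw [if_pos hd]
          have hcp : pvChainP sd (sd.length + 2) s = [s] := by
            rw [pvChainP_succ, hlk]; simp [hd]
          exact ⟨hcp.symm, pvGoodM_append sd memo s [s] hg hcp.symm⟩
        · rw [if_neg hd]
          have hpos : sd.length ≠ 0 := by
            intro h0
            rw [h0, pvH_zero, hlk] at hv
            simp only [if_neg hd] at hv
            exact absurd hv (by simp)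
          obtain ⟨n, hN⟩ : ∃ n, sd.length = n + 1 := ⟨sd.length - 1, by omega⟩
          · have hv' : pvH sd (n + 1) s = some v := by rw [← hN]; exact hv
            have hdep := pvH_dep sd n s v step hv' hlk hd
            have hvN : v ≤ sd.length := by
              have := pvH_le sd sd.length s v hv
              omega
            have hIH : ∀ d ∈ (List.lookup "deps" step).getD [], ∀ memo',
                pvGoodM sd memo' →
                (pvChainB sd f' memo' d).1 = pvChainP sd (sd.length + 2) d ∧
                pvGoodM sd (pvChainB sd f' memo' d).2 := by
              intro d hdm memo' hg'
              obtain ⟨vd, hvd, hlt⟩ := hdep d hdm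
              have hvdN : pvH sd sd.length d = some vd :=
                pvH_mono_le sd n sd.length (by omega) d vd hvd
              exact ih vd (by omega) d f' memo' hvdN (by omega) hg'
            obtain ⟨hr1, hr2⟩ := pvFoldB sd f' _ hIH none memo hg
            have hcp : pvChainP sd (sd.length + 2) s
                = s :: (((List.lookup "deps" step).getD []).foldl
                    (fun b d => pvBest b (pvChainP sd (sd.length + 2) d)) none).getD [] := by
              rw [pvChainP_succ, hlk]
              simp only [if_neg hd]
              congr 2
              apply PySem.List.foldl_congr_mem
              intro acc d hdm
              obtain ⟨vd, hvd, hlt⟩ := hdep d hdm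
              have hvdN : pvH sd sd.length d = some vd :=
                pvH_mono_le sd n sd.length (by omega) d vd hvd
              rw [pvChainP_inv sd vd d (sd.length + 1) (sd.length + 2) hvdN (by omega) (by omega)]
            constructor
            · simp only [hr1, hcp]
            · apply pvGoodM_append sd _ s _ hr2
              rw [hcp, hr1]

-- ===== VERDICT (by name: the statement is the Claim_ definition above) =====
theorem find_path_to_foundation_spec : Claim_equal_find_path_to_foundation := by
  intro step_id sd path _hdom hpre
  unfold Spec_find_path_to_foundation find_path_to_foundation find_path_to_foundation_alt
  obtain ⟨v, hv⟩ := Option.isSome_iff_exists.mp hpre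
  have hvN : v ≤ sd.length := pvH_le sd _ _ _ hv
  have h1 := pvGoA_eq sd (sd.length + 1) step_id (path.getD [])
  have h2 := (pvChainB_eq sd v step_id (sd.length + 1) [] hv (by omega)
      (by intro k w hw; simp [List.lookup] at hw)).1
  have h3 := pvChainP_inv sd v step_id (sd.length + 1) (sd.length + 2) hv (by omega) (by omega)
  rw [h1, h2, h3]
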